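-- pv_equiv track=rewrite | github.com/Akiuro/2024-version | src/main/python/util/sptools.py | def_base_build
-- ===== SOURCE A (Python) =====
-- def def_base_build(defense=0, build=None):
--     if build:
--         defense = build[1]
--
--     if defense == 0:
--         return 0
--     if 1 <= defense <= 10:
--         return 1 + def_base_build(defense - 1)
--     if 11 <= defense <= 20:
--         return 2 + def_base_build(defense - 1)
--     if 21 <= defense <= 30:
--         return 3 + def_base_build(defense - 1)
--     if 31 <= defense <= 40:
--         return 4 + def_base_build(defense - 1)
--     if 41 <= defense <= 50:
--         return 5 + def_base_build(defense - 1)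
--     if 51 <= defense <= 60:
--         return 6 + def_base_build(defense - 1)
--     if 61 <= defense <= 70:
--         return 7 + def_base_build(defense - 1)
--     if 71 <= defense <= 80:
--         return 8 + def_base_build(defense - 1)
--     if 81 <= defense <= 90:
--         return 9 + def_base_build(defense - 1)
--     if 91 <= defense <= 105:
--         return 10 + def_base_build(defense - 1)
--     if 106 <= defense <= 110:
--         return 12 + def_base_build(defense - 1)
--     if 111 <= defense <= 115:
--         return 14 + def_base_build(defense - 1)
--     if 116 <= defense <= 119:
--         return 15 + def_base_build(defense - 1)
--     if defense == 100:
--         return 20 + def_base_build(defense - 1)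
--     raise ValueError("SP build defense points must be an integer"
--                      "between 0 and 120")
-- ===== SOURCE B (Python) =====
-- def def_base_build(defense=0, build=None):
--     if build:
--         defense = build[1]
--     if not (0 <= defense <= 119):
--         raise ValueError("SP build defense points must be an integer"
--                          "between 0 and 120")
--     # closed form: prefix-sum bases at the tier boundaries above 90, arithmetic below
--     for lo, base, cost in ((115, 730, 15), (110, 660, 14), (105, 600, 12), (90, 450, 10)):
--         if defense > lo:
--             return base + (defense - lo) * cost
--     q, r = divmod(defense, 10)
--     return 5 * q * (q + 1) + r * (q + 1)
-- ===== Notes on version B (the rewrite author's own statement) =====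
-- stated objective: simpler
-- what changed: Replaces the per-point recursion (one recursive call per defense point) with a non-recursive closed form: constant bases for the tiers above 90 and an arithmetic divmod formula for the uniform 10-point tiers below.
-- outside the precondition, e.g. on def_base_build(-1, None): A raises ValueError, B raises ValueError; on def_base_build(120, None): A raises ValueError, B raises ValueError; on def_base_build(0, [3]): A raises IndexError, B raises IndexError
import Mathlib
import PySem

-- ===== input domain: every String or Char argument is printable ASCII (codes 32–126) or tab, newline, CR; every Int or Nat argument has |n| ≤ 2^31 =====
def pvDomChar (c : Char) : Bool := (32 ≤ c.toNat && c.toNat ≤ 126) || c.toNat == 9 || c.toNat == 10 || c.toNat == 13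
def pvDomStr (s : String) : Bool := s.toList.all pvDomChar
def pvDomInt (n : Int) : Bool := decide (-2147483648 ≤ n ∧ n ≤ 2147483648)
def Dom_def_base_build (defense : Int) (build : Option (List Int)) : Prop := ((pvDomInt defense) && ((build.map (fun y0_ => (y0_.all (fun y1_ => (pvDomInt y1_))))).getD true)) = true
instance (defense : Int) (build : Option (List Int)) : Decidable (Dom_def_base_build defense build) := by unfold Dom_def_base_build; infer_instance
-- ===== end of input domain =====

-- B replaces A's per-point recursion by a non-recursive closed-form computation; return values agree on Pre_ (valid integer defense 0..119).


-- ===== PORT A =====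
-- A's recursion with build=None: the if-chain of tier intervals, recursive call on defense-1.
-- The final `raise ValueError` branch returns 0 here; those inputs are outside Pre_.
-- fuel makes the Int recursion structural (fuel = d.toNat + 1 suffices: d drops by 1 each call)
def defBaseBuildGo : Nat → Int → Int
  | 0, _ => 0
  | fuel + 1, d =>
  if d = 0 then 0
  else if 1 ≤ d ∧ d ≤ 10 then 1 + defBaseBuildGo fuel (d - 1)
  else if 11 ≤ d ∧ d ≤ 20 then 2 + defBaseBuildGo fuel (d - 1)
  else if 21 ≤ d ∧ d ≤ 30 then 3 + defBaseBuildGo fuel (d - 1)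
  else if 31 ≤ d ∧ d ≤ 40 then 4 + defBaseBuildGo fuel (d - 1)
  else if 41 ≤ d ∧ d ≤ 50 then 5 + defBaseBuildGo fuel (d - 1)
  else if 51 ≤ d ∧ d ≤ 60 then 6 + defBaseBuildGo fuel (d - 1)
  else if 61 ≤ d ∧ d ≤ 70 then 7 + defBaseBuildGo fuel (d - 1)
  else if 71 ≤ d ∧ d ≤ 80 then 8 + defBaseBuildGo fuel (d - 1)
  else if 81 ≤ d ∧ d ≤ 90 then 9 + defBaseBuildGo fuel (d - 1)
  else if 91 ≤ d ∧ d ≤ 105 then 10 + defBaseBuildGo fuel (d - 1)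
  else if 106 ≤ d ∧ d ≤ 110 then 12 + defBaseBuildGo fuel (d - 1)
  else if 111 ≤ d ∧ d ≤ 115 then 14 + defBaseBuildGo fuel (d - 1)
  else if 116 ≤ d ∧ d ≤ 119 then 15 + defBaseBuildGo fuel (d - 1)
  else if d = 100 then 20 + defBaseBuildGo fuel (d - 1)
  else 0  -- Python: raise ValueError (outside Pre_)

-- `if build:` — truthiness (some non-empty list); build[1] raises IndexError on a
-- one-element list (outside Pre_; we keep defense there, any value is unclaimed).
def def_base_build (defense : Int) (build : Option (List Int)) : Int :=
  match build with
  | some (_ :: b :: _) => defBaseBuildGo (b.toNat + 1) b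
  | _ => defBaseBuildGo (defense.toNat + 1) defense

-- ===== PORT B =====
-- B's closed form: the boundary loop unrolled in loop order, else the divmod formula.
def defBaseBuildClosed (d : Int) : Int :=
  if ¬ (0 ≤ d ∧ d ≤ 119) then 0  -- Python: raise ValueError (outside Pre_)
  else if d > 115 then 730 + (d - 115) * 15
  else if d > 110 then 660 + (d - 110) * 14
  else if d > 105 then 600 + (d - 105) * 12
  else if d > 90 then 450 + (d - 90) * 10
  else
    let q := PySem.Int.floordiv d 10
    let r := PySem.Int.mod d 10
    5 * q * (q + 1) + r * (q + 1)

-- `if build:` truthiness; `build[1]` via pyGet? (IndexError on a 1-element list → outside Pre_).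
def def_base_build_alt (defense : Int) (build : Option (List Int)) : Int :=
  let l := build.getD []
  let d := if l ≠ [] then (PySem.List.pyGet? l 1).getD defense else defense
  defBaseBuildClosed d

-- ===== PRECONDITION & SPEC =====
-- Pre_ excludes exactly the inputs where the Python A raises: a truthy build of
-- length 1 (IndexError at build[1]) and an effective defense outside 0..119 (ValueError).
def Pre_def_base_build (defense : Int) (build : Option (List Int)) : Prop :=
  let l := build.getD []
  if l = [] then 0 ≤ defense ∧ defense ≤ 119
  else 2 ≤ l.length ∧ 0 ≤ l.getD 1 0 ∧ l.getD 1 0 ≤ 119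

instance (defense : Int) (build : Option (List Int)) : Decidable (Pre_def_base_build defense build) := by
  unfold Pre_def_base_build; infer_instance

def pvWitness_def_base_build : Int × Option (List Int) := (5, some [9, 7])

def Spec_def_base_build (defense : Int) (build : Option (List Int)) (out : Int) : Prop := out = def_base_build_alt defense build
instance (defense : Int) (build : Option (List Int)) (out : Int) : Decidable (Spec_def_base_build defense build out) := by unfold Spec_def_base_build; infer_instance

-- ===== CLAIM (what is proved, stated in full; the proofs are below) =====
def Claim_equal_def_base_build : Prop := ∀ (defense : Int) (build : Option (List Int)), Dom_def_base_build defense build → Pre_def_base_build defense build → Spec_def_base_build defense build (def_base_build defense build)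

-- ===== LEMMAS AND PROOFS =====
set_option maxRecDepth 4000 in
lemma go_eq_closed_fin : ∀ n : Fin 120, defBaseBuildGo (n.val + 1) (n.val : Int) = defBaseBuildClosed (n.val : Int) := by decide

lemma go_eq_closed (d : Int) (h0 : 0 ≤ d) (h1 : d ≤ 119) : defBaseBuildGo (d.toNat + 1) d = defBaseBuildClosed d := by
  obtain ⟨n, rfl⟩ : ∃ n : Nat, d = (n : Int) := ⟨d.toNat, by omega⟩
  simpa using go_eq_closed_fin ⟨n, by omega⟩

-- ===== VERDICT (by name: the statement is the Claim_ definition above) =====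
theorem def_base_build_spec : Claim_equal_def_base_build := by
  intro defense build _ hpre
  unfold Spec_def_base_build def_base_build def_base_build_alt
  unfold Pre_def_base_build at hpre
  rcases build with _ | ⟨_ | ⟨a, _ | ⟨b, l⟩⟩⟩
  all_goals simp only [Option.getD, List.getD, PySem.List.pyGet?, PySem.List.pyIdx?] at hpre ⊢
  all_goals simp at hpre ⊢
  · exact go_eq_closed _ hpre.1 hpre.2
  · exact go_eq_closed _ hpre.1 hpre.2
  · exact go_eq_closed _ hpre.1 hpre.2
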